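-- pv_equiv track=rewrite | github.com/Haoxiang-SANG/AHU-ZX36371-Python-lab | lab1/lab1-codes.py | is_double
-- ===== SOURCE A (Python) =====
-- def is_double(x):
-- 	cnt = 0
-- 	for a in x :
-- 		if a == '.':
-- 			cnt += 1
-- 		if '0' <= a <= '9' or a == '.' :
-- 			continue;
-- 		else :
-- 			return False;
-- 	if cnt == 0 or cnt == 1 :
-- 		return True
-- 	else :
-- 		return False
-- ===== SOURCE B (Python) =====
-- def is_double(x):
--     head, _, tail = x.partition('.')
--     return all('0' <= c <= '9' for c in head) and all('0' <= c <= '9' for c in tail)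
-- ===== Notes on version B (the rewrite author's own statement) =====
-- stated objective: idiomatic
-- what changed: Replaced the char-by-char loop with a dot counter and early returns by a single str.partition at the first dot plus two all()-digit checks (a second dot lands in the tail and fails the digit test).
import Mathlib
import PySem

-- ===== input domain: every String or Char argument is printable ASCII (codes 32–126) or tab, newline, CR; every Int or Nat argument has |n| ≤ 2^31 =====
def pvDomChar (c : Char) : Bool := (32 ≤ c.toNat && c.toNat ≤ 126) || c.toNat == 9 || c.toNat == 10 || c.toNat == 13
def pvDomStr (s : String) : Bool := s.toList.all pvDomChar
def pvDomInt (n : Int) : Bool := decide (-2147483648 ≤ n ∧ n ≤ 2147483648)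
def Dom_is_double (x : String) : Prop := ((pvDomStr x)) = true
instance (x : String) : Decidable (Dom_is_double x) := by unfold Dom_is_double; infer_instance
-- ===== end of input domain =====

-- B replaces A's counting loop by str.partition at the first '.' plus two all-digits checks (same behaviour, more idiomatic).

-- ===== PORT A =====
-- A's for-loop with the dot counter and early 'return False'
def pvLoop : List Char → Nat → Bool
  | [], cnt => (cnt == 0 || cnt == 1)
  | a :: r, cnt =>
      let cnt' := if a = '.' then cnt + 1 else cnt
      if ('0' ≤ a ∧ a ≤ '9') ∨ a = '.' then pvLoop r cnt' else false

def is_double (x : String) : Bool := pvLoop x.toList 0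

-- ===== PORT B =====
-- '0' <= c <= '9'
def pvDig (a : Char) : Bool := decide ('0' ≤ a ∧ a ≤ '9')

-- x.partition('.') = (takeWhile, first '.' if any, rest); then the two all() checks
def pvAlt (l : List Char) : Bool :=
  let head := l.takeWhile (· ≠ '.')
  match l.dropWhile (· ≠ '.') with
  | [] => head.all pvDig
  | _ :: tail => head.all pvDig && tail.all pvDig

def is_double_alt (x : String) : Bool := pvAlt x.toList

-- ===== PRECONDITION & SPEC =====
def Spec_is_double (x : String) (out : Bool) : Prop := out = is_double_alt x
instance (x : String) (out : Bool) : Decidable (Spec_is_double x out) := by unfold Spec_is_double; infer_instance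

-- ===== CLAIM (what is proved, stated in full; the proofs are below) =====
def Claim_equal_is_double : Prop := ∀ (x : String), Dom_is_double x → Spec_is_double x (is_double x)

-- ===== LEMMAS AND PROOFS =====

-- once cnt ≥ 2, A can only return false
theorem pvLoop_ge_two (l : List Char) : ∀ c, 2 ≤ c → pvLoop l c = false := by
  induction l with
  | nil => intro c hc; simp [pvLoop]; omega
  | cons a r ih =>
      intro c hc
      by_cases h : ('0' ≤ a ∧ a ≤ '9') ∨ a = '.'
      · simp only [pvLoop, h, if_true]
        exact ih _ (by split_ifs <;> omega)
      · simp [pvLoop, h]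

-- after the first dot, A just checks that the rest are digits
theorem pvLoop_one (l : List Char) : pvLoop l 1 = l.all pvDig := by
  induction l with
  | nil => rfl
  | cons a r ih =>
      simp only [pvLoop, List.all_cons]
      by_cases hd : a = '.'
      · subst hd
        simp [pvLoop_ge_two r 2 (le_refl 2), pvDig]
      · by_cases hdig : ('0' ≤ a ∧ a ≤ '9')
        · simp [hd, hdig, ih, pvDig]
        · simp [hd, hdig, pvDig]

-- stepping pvAlt over a non-dot character
theorem pvAlt_cons_nondot (a : Char) (t : List Char) (h : a ≠ '.') :
    pvAlt (a :: t) = (pvDig a && pvAlt t) := by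
  simp only [pvAlt]
  rw [List.takeWhile_cons_of_pos (by simpa using h), List.dropWhile_cons_of_pos (by simpa using h)]
  cases hdw : t.dropWhile (· ≠ '.') <;> simp [Bool.and_assoc]

theorem pvLoop_eq_pvAlt (l : List Char) : pvLoop l 0 = pvAlt l := by
  induction l with
  | nil => rfl
  | cons a r ih =>
      by_cases hd : a = '.'
      · subst hd
        simp only [pvLoop, pvAlt, List.takeWhile, List.dropWhile]
        simp [pvLoop_one]
      · rw [pvAlt_cons_nondot a r hd]
        simp only [pvLoop]
        by_cases hdig : ('0' ≤ a ∧ a ≤ '9')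
        · simp [hd, hdig, ih, pvDig]
        · simp [hd, hdig, pvDig]

-- ===== VERDICT (by name: the statement is the Claim_ definition above) =====
theorem is_double_spec : Claim_equal_is_double := by
  intro x _
  show is_double x = is_double_alt x
  exact pvLoop_eq_pvAlt x.toList
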